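-- pv_equiv track=rewrite | github.com/TOTOGT/PabloNogueira-dm3-lab | scripts/collatz_transfer_operator.py | preimages
-- ===== SOURCE A (Python) =====
-- def v2(m: int) -> int:
--     """2-adic valuation of a positive integer m (highest k s.t. 2^k | m)."""
--     if m == 0:
--         raise ValueError("v2(0) is undefined (infinite)")
--     k = 0
--     while m % 2 == 0:
--         m >>= 1
--         k += 1
--     return k
--
-- def preimages(x: int, k_max: int = 20) -> list:
--     """
--     Enumerate odd integer preimages u of x under T, i.e., T(u) = x.
--
--     Solving  (3u+1) / 2^k = x  →  u = (x · 2^k − 1) / 3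
--     Admissibility: u must be a positive odd integer.
--
--     Returns list of (u, k) pairs for k = 1 … k_max.
--     """
--     results = []
--     for k in range(1, k_max + 1):
--         numerator = x * (1 << k) - 1
--         if numerator % 3 == 0:
--             u = numerator // 3
--             if u > 0 and u % 2 == 1:
--                 # Verify v2(3u+1) == k (exact valuation, not just divisibility)
--                 if v2(3 * u + 1) == k:
--                     results.append((u, k))
--     return results
-- ===== SOURCE B (Python) =====
-- def preimages(x: int, k_max: int = 20) -> list:
--     """
--     Enumerate odd integer preimages u of x under T, i.e., T(u) = x.
--
--     Preimages exist only for odd positive x not divisible by 3: then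
--     x*2^k ≡ 1 (mod 3) holds exactly for k of one fixed parity (k even if
--     x ≡ 1 mod 3, k odd if x ≡ 2 mod 3), and consecutive admissible u obey
--     the recurrence u' = 4u + 1.  So B computes the first admissible k and u
--     once, then generates all pairs by the recurrence — no per-k divisibility
--     test, shift or division.
--     """
--     if x <= 0 or x % 2 == 0 or x % 3 == 0:
--         return []
--     k = 2 if x % 3 == 1 else 1
--     u = (x << k) // 3
--     out = []
--     while k <= k_max:
--         out.append((u, k))
--         u = 4 * u + 1
--         k += 2
--     return out
-- ===== Notes on version B (the rewrite author's own statement) =====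
-- stated objective: alternative
-- what changed: B replaces A's per-k mod-3 divisibility test, shift, division and inner 2-adic-valuation loop by a closed-form residue analysis: admissible k form a single arithmetic progression k0, k0+2, ... determined by x mod 3, and successive preimages obey the recurrence u' = 4u + 1, so B iterates that recurrence with no per-k test or division (intended as faster; a timing run measured large ratios but could not confirm the label since A timed out on the largest inputs).
import Mathlib
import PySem

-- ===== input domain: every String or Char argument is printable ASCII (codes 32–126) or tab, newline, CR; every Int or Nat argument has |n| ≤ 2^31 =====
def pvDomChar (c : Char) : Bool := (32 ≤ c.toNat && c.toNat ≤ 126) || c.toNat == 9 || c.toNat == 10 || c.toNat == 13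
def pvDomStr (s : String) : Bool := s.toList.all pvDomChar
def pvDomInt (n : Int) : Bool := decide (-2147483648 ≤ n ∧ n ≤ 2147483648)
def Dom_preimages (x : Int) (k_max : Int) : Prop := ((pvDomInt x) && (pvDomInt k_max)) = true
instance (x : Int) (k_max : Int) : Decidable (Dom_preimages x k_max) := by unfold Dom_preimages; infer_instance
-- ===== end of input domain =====

-- B replaces A's per-k mod-3 test, shift, division and inner 2-adic-valuation loop by a
-- closed-form residue analysis (admissible k form one arithmetic progression mod 2, and
-- successive u obey u' = 4u+1), iterating that recurrence instead; objective: alternative.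

-- ===== PORT A =====
-- Python's v2 loop 'while m % 2 == 0: m >>= 1; k += 1'; the extra 'm ≠ 0' in the
-- guard only makes the recursion total (in A, v2 is only called with m = 3u+1 ≥ 4,
-- and for m ≠ 0 the Python loop never reaches 0).
def v2loop (m : Int) (k : Int) : Int :=
  if h : PySem.Int.mod m 2 = 0 ∧ m ≠ 0 then v2loop (PySem.Int.floordiv m 2) (k + 1) else k
termination_by m.natAbs
decreasing_by
  rcases h with ⟨hm, hm0⟩
  rw [PySem.Int.mod_eq_zero_iff_dvd] at hm
  rcases hm with ⟨c, rfl⟩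
  rw [PySem.Int.floordiv_eq_ediv_of_pos (by norm_num)]
  rw [Int.mul_ediv_cancel_left c (by norm_num)]
  omega

-- Python's v2; at m = 0 Python raises ValueError, but that branch is unreachable
-- at the call site (the argument is 3*u+1 ≥ 4).
def v2 (m : Int) : Int := if m = 0 then 0 else v2loop m 0

def preimages (x : Int) (k_max : Int) : List (Int × Int) :=
  (PySem.List.pyRange 1 (k_max + 1)).foldl (fun results k =>
    -- 1 << k: k ranges over 1 … k_max, so k ≥ 1 and 2 ^ k.toNat is exact
    let numerator := x * 2 ^ k.toNat - 1
    if PySem.Int.mod numerator 3 = 0 then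
      let u := PySem.Int.floordiv numerator 3
      if u > 0 ∧ PySem.Int.mod u 2 = 1 then
        if v2 (3 * u + 1) = k then results ++ [(u, k)] else results
      else results
    else results) []

-- ===== PORT B =====
-- Source B's while loop: append (u, k), then u ← 4u+1, k ← k+2, while k ≤ k_max
def altLoop (k_max : Int) (u : Int) (k : Int) (out : List (Int × Int)) : List (Int × Int) :=
  if k ≤ k_max then altLoop k_max (4 * u + 1) (k + 2) (out ++ [(u, k)]) else out
termination_by (k_max + 2 - k).toNat
decreasing_by omega

def preimages_alt (x : Int) (k_max : Int) : List (Int × Int) :=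
  if x ≤ 0 ∨ PySem.Int.mod x 2 = 0 ∨ PySem.Int.mod x 3 = 0 then []
  else
    let k := if PySem.Int.mod x 3 = 1 then (2 : Int) else 1
    let u := PySem.Int.floordiv (x * 2 ^ k.toNat) 3   -- (x << k) // 3
    altLoop k_max u k []

-- ===== PRECONDITION & SPEC =====
def Spec_preimages (x : Int) (k_max : Int) (out : List (Int × Int)) : Prop := out = preimages_alt x k_max
instance (x : Int) (k_max : Int) (out : List (Int × Int)) : Decidable (Spec_preimages x k_max out) := by unfold Spec_preimages; infer_instance

-- ===== CLAIM (what is proved, stated in full; the proofs are below) =====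
def Claim_equal_preimages : Prop := ∀ (x : Int) (k_max : Int), Dom_preimages x k_max → Spec_preimages x k_max (preimages x k_max)

-- ===== LEMMAS AND PROOFS =====

lemma v2loop_odd_mul_pow (o : Int) (ho : PySem.Int.mod o 2 = 1) (n : Nat) :
    ∀ c : Int, v2loop (o * 2 ^ n) c = c + n := by
  induction n with
  | zero =>
    intro c
    unfold v2loop
    rw [pow_zero, mul_one, dif_neg (by rw [ho]; simp)]
    simp
  | succ n ih =>
    intro c
    have ho2 : o % 2 = 1 := by
      rw [PySem.Int.mod_eq_emod_of_pos (by norm_num)] at ho; exact ho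
    have hne : o * 2 ^ (n + 1) ≠ 0 := by
      have : o ≠ 0 := by omega
      positivity
    have hmod : PySem.Int.mod (o * 2 ^ (n + 1)) 2 = 0 := by
      rw [PySem.Int.mod_eq_zero_iff_dvd]
      exact ⟨o * 2 ^ n, by ring⟩
    unfold v2loop
    simp only [hmod, hne, ne_eq, not_false_eq_true, and_true, dite_true]
    have hdiv : PySem.Int.floordiv (o * 2 ^ (n + 1)) 2 = o * 2 ^ n := by
      rw [PySem.Int.floordiv_eq_ediv_of_pos (by norm_num)]
      have : o * 2 ^ (n + 1) = (o * 2 ^ n) * 2 := by ring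
      rw [this, Int.mul_ediv_cancel _ (by norm_num)]
    rw [hdiv, ih (c + 1)]
    push_cast
    ring

lemma v2_odd_mul_pow (o : Int) (ho : PySem.Int.mod o 2 = 1) (n : Nat) :
    v2 (o * 2 ^ n) = n := by
  have ho2 : o % 2 = 1 := by
    rw [PySem.Int.mod_eq_emod_of_pos (by norm_num)] at ho; exact ho
  have hne : o * 2 ^ n ≠ 0 := by
    have : o ≠ 0 := by omega
    positivity
  rw [v2, if_neg hne, v2loop_odd_mul_pow o ho n 0, zero_add]

-- A's loop body, on any k with 1 ≤ k and x odd positive, appends exactly the k with x·2^k ≡ 1 (mod 3)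
lemma step_eq_of_odd_pos (x k : Int) (hx : 0 < x) (hxo : PySem.Int.mod x 2 = 1)
    (hk : 1 ≤ k) (res : List (Int × Int)) :
    (let numerator := x * 2 ^ k.toNat - 1
     if PySem.Int.mod numerator 3 = 0 then
       let u := PySem.Int.floordiv numerator 3
       if u > 0 ∧ PySem.Int.mod u 2 = 1 then
         if v2 (3 * u + 1) = k then res ++ [(u, k)] else res
       else res
     else res)
    = (if (PySem.Int.mod (x * 2 ^ k.toNat) 3 == 1) = true
        then res ++ [(PySem.Int.floordiv (x * 2 ^ k.toNat) 3, k)] else res) := by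
  have hn1 : 1 ≤ k.toNat := by omega
  set N : Int := x * 2 ^ k.toNat with hN
  have hNge : 2 ≤ N := by
    have h2 : (2 : Int) ≤ 2 ^ k.toNat := by
      calc (2:Int) = 2 ^ 1 := by norm_num
      _ ≤ 2 ^ k.toNat := by
        apply pow_le_pow_right₀ (by norm_num) hn1
    nlinarith
  have hmodN : PySem.Int.mod N 3 = N % 3 := PySem.Int.mod_eq_emod_of_pos (by norm_num)
  have hmodN1 : PySem.Int.mod (N - 1) 3 = (N - 1) % 3 := PySem.Int.mod_eq_emod_of_pos (by norm_num)
  by_cases hdvd : PySem.Int.mod (N - 1) 3 = 0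
  · -- the admissible case: both sides append
    have h3 : (3:Int) ∣ (N - 1) := (PySem.Int.mod_eq_zero_iff_dvd _ _).mp hdvd
    rcases h3 with ⟨u, hu⟩
    have huval : PySem.Int.floordiv (N - 1) 3 = u := by
      rw [(PySem.Int.floordiv_eq_iff_of_pos (by norm_num) : _ ↔ _)]
      omega
    have hupos : 0 < u := by omega
    have hNeven : (2:Int) ∣ N := by
      rw [hN]
      exact Dvd.dvd.mul_left (dvd_pow_self 2 (by omega)) x
    have huodd : u % 2 = 1 := by omega
    have huodd' : PySem.Int.mod u 2 = 1 := by
      rw [PySem.Int.mod_eq_emod_of_pos (by norm_num)]; exact huodd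
    have h3u : 3 * u + 1 = N := by omega
    have hv2 : v2 (3 * u + 1) = k := by
      rw [h3u, hN, v2_odd_mul_pow x hxo k.toNat]
      omega
    have hB : PySem.Int.mod N 3 = 1 := by
      rw [hmodN]
      rw [hmodN1] at hdvd
      omega
    simp only [hdvd, huval, hupos, huodd', and_self, hv2, if_pos, hB, beq_self_eq_true]
    have hu3 : PySem.Int.floordiv N 3 = u := by
      rw [(PySem.Int.floordiv_eq_iff_of_pos (by norm_num) : _ ↔ _)]
      omega
    rw [hu3]
  · -- not admissible: both sides skip
    have hB : ¬ PySem.Int.mod N 3 = 1 := by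
      rw [hmodN]
      rw [hmodN1] at hdvd
      have := Int.emod_nonneg (N - 1) (by norm_num : (3:Int) ≠ 0)
      have := Int.emod_lt_of_pos (N - 1) (by norm_num : (0:Int) < 3)
      omega
    have hB' : ¬ ((PySem.Int.mod N 3 == 1) = true) := by simpa using hB
    rw [if_neg hdvd, if_neg hB']

-- every nonzero integer is odd-times-power-of-two
lemma exists_odd_mul_pow (m : Int) (hm : m ≠ 0) :
    ∃ (o : Int) (j : Nat), o % 2 = 1 ∧ m = o * 2 ^ j := by
  induction hn : m.natAbs using Nat.strong_induction_on generalizing m with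
  | _ n ih =>
    rcases Int.even_or_odd m with he | hodd
    · rcases he with ⟨c, hc⟩
      have hc' : m = c * 2 := by omega
      have hcne : c ≠ 0 := by rintro rfl; simp [hc'] at hm
      have hlt : c.natAbs < n := by
        subst hn
        omega
      obtain ⟨o, j, hoj, hco⟩ := ih c.natAbs hlt c hcne rfl
      exact ⟨o, j + 1, hoj, by rw [hc', hco]; ring⟩
    · exact ⟨m, 0, Int.odd_iff.mp hodd, by ring⟩

-- A's loop body never appends when x ≤ 0, x is even, or 3 ∣ x
lemma step_skip_of_bad (x k : Int)
    (hx : x ≤ 0 ∨ PySem.Int.mod x 2 = 0 ∨ PySem.Int.mod x 3 = 0)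
    (hk : 1 ≤ k) (res : List (Int × Int)) :
    (let numerator := x * 2 ^ k.toNat - 1
     if PySem.Int.mod numerator 3 = 0 then
       let u := PySem.Int.floordiv numerator 3
       if u > 0 ∧ PySem.Int.mod u 2 = 1 then
         if v2 (3 * u + 1) = k then res ++ [(u, k)] else res
       else res
     else res) = res := by
  set N : Int := x * 2 ^ k.toNat with hN
  by_cases hdvd : PySem.Int.mod (N - 1) 3 = 0
  · have h3 : (3:Int) ∣ (N - 1) := (PySem.Int.mod_eq_zero_iff_dvd _ _).mp hdvd
    rcases h3 with ⟨u, hu⟩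
    have huval : PySem.Int.floordiv (N - 1) 3 = u := by
      rw [(PySem.Int.floordiv_eq_iff_of_pos (by norm_num) : _ ↔ _)]
      omega
    rcases hx with hneg | heven | h3x
    · -- x ≤ 0: N ≤ 0, so u ≤ 0 and the u > 0 test fails
      have hNle : N ≤ 0 := by
        rw [hN]
        exact mul_nonpos_of_nonpos_of_nonneg hneg (by positivity)
      have hule : ¬ u > 0 := by omega
      simp only [hdvd, if_pos, huval]
      rw [if_neg (by tauto)]
    · -- x even and x ≠ 0 with u > 0 odd: v2(3u+1) = v2(x·2^k) > k, the check fails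
      by_cases hguard : u > 0 ∧ PySem.Int.mod u 2 = 1
      · have hxne : x ≠ 0 := by
          rintro rfl
          simp only [hN, zero_mul] at hu
          omega
        obtain ⟨o, j, ho, hxo⟩ := exists_odd_mul_pow x hxne
        have hj : 1 ≤ j := by
          rcases Nat.eq_zero_or_pos j with h0 | h1
          · exfalso
            rw [PySem.Int.mod_eq_emod_of_pos (by norm_num)] at heven
            rw [h0] at hxo
            omega
          · exact h1
        have h3u : 3 * u + 1 = N := by omega
        have ho' : PySem.Int.mod o 2 = 1 := by
          rw [PySem.Int.mod_eq_emod_of_pos (by norm_num)]; exact ho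
        have hv2 : v2 (3 * u + 1) = (j + k.toNat : Nat) := by
          rw [h3u, hN, hxo]
          have : o * 2 ^ j * 2 ^ k.toNat = o * 2 ^ (j + k.toNat) := by ring
          rw [this, v2_odd_mul_pow o ho' (j + k.toNat)]
        have hne : v2 (3 * u + 1) ≠ k := by
          rw [hv2]
          push_cast
          omega
        simp only [hdvd, if_pos, huval]
        rw [if_pos hguard, if_neg hne]
      · simp only [hdvd, if_pos, huval]
        rw [if_neg hguard]
    · -- 3 ∣ x: 3 ∣ N contradicts 3 ∣ N − 1
      exfalso
      have hdx : (3:Int) ∣ x := by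
        rw [PySem.Int.mod_eq_zero_iff_dvd] at h3x; exact h3x
      rcases hdx with ⟨c, hc⟩
      have : N = 3 * (c * 2 ^ k.toNat) := by rw [hN, hc]; ring
      omega
  · rw [if_neg hdvd]

-- the admissibility predicate shared by both reductions
def Padm (x j : Int) : Bool := PySem.Int.mod (x * 2 ^ j.toNat) 3 == 1

lemma Padm_step (x k : Int) (hk : 0 ≤ k) (h : Padm x k = true) :
    Padm x (k + 1) = false ∧ Padm x (k + 2) = true := by
  unfold Padm at *
  set N : Int := x * 2 ^ k.toNat with hN
  have h1 : (k + 1).toNat = k.toNat + 1 := by omega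
  have h2 : (k + 2).toNat = k.toNat + 2 := by omega
  have e1 : x * 2 ^ (k + 1).toNat = 2 * N := by rw [h1, hN]; ring
  have e2 : x * 2 ^ (k + 2).toNat = 4 * N := by rw [h2, hN]; ring
  have hm : PySem.Int.mod N 3 = N % 3 := PySem.Int.mod_eq_emod_of_pos (by norm_num)
  have hm1 : PySem.Int.mod (2 * N) 3 = (2 * N) % 3 := PySem.Int.mod_eq_emod_of_pos (by norm_num)
  have hm2 : PySem.Int.mod (4 * N) 3 = (4 * N) % 3 := PySem.Int.mod_eq_emod_of_pos (by norm_num)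
  have hNmod : N % 3 = 1 := by
    rw [hm] at h
    simpa using h
  constructor
  · rw [e1, hm1]
    simp only [beq_eq_false_iff_ne, ne_eq]
    omega
  · rw [e2, hm2]
    simp only [beq_iff_eq]
    omega

-- B's recurrence loop produces exactly the filtered-mapped tail from k on,
-- given the invariant u = (x·2^k) // 3 and admissibility of k
lemma altLoop_eq (x : Int) (k_max : Int) :
    ∀ (n : Nat) (k : Int), (k_max + 1 - k).toNat = n → 0 ≤ k → Padm x k = true →
    ∀ out, altLoop k_max (PySem.Int.floordiv (x * 2 ^ k.toNat) 3) k out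
      = out ++ ((PySem.List.pyRange k (k_max + 1)).filter (fun j => Padm x j)).map
          (fun j => (PySem.Int.floordiv (x * 2 ^ j.toNat) 3, j)) := by
  intro n
  induction n using Nat.strong_induction_on with
  | _ n ih =>
    intro k hn hk hP out
    by_cases hle : k ≤ k_max
    · -- loop body runs
      have hrec : 4 * PySem.Int.floordiv (x * 2 ^ k.toNat) 3 + 1
          = PySem.Int.floordiv (x * 2 ^ (k + 2).toNat) 3 := by
        have hNmod : (x * 2 ^ k.toNat) % 3 = 1 := by
          have h' := hP
          unfold Padm at h'
          rw [PySem.Int.mod_eq_emod_of_pos (by norm_num)] at h'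
          simpa using h'
        have h2 : (k + 2).toNat = k.toNat + 2 := by omega
        have e2 : x * 2 ^ (k + 2).toNat = 4 * (x * 2 ^ k.toNat) := by rw [h2]; ring
        set N : Int := x * 2 ^ k.toNat with hN
        have hu : PySem.Int.floordiv N 3 = (N - 1) / 3 := by
          rw [(PySem.Int.floordiv_eq_iff_of_pos (by norm_num) : _ ↔ _)]
          omega
        rw [e2, hu, eq_comm]
        rw [(PySem.Int.floordiv_eq_iff_of_pos (by norm_num) : _ ↔ _)]
        omega
      obtain ⟨hP1, hP2⟩ := Padm_step x k hk hP
      have htail : (PySem.List.pyRange (k + 1) (k_max + 1)).filter (fun j => Padm x j)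
          = (PySem.List.pyRange (k + 2) (k_max + 1)).filter (fun j => Padm x j) := by
        by_cases hc : k + 1 ≤ k_max
        · rw [PySem.List.pyRange_one_cons (by omega), show k + 1 + 1 = k + 2 by ring]
          simp [hP1]
        · rw [PySem.List.pyRange_one_eq_nil (by omega), PySem.List.pyRange_one_eq_nil (by omega)]
      rw [altLoop, if_pos hle, hrec,
        ih ((k_max + 1 - (k + 2)).toNat) (by omega) (k + 2) rfl (by omega) hP2]
      rw [PySem.List.pyRange_one_cons (show k < k_max + 1 by omega), List.filter_cons]
      simp only [hP, if_true]
      rw [htail]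
      simp
    · rw [altLoop, if_neg hle, PySem.List.pyRange_one_eq_nil (by omega)]
      simp

-- ===== VERDICT (by name: the statement is the Claim_ definition above) =====
theorem preimages_spec : Claim_equal_preimages := by
  intro x k_max _
  unfold Spec_preimages preimages preimages_alt
  by_cases hx : x ≤ 0 ∨ PySem.Int.mod x 2 = 0 ∨ PySem.Int.mod x 3 = 0
  · rw [if_pos hx]
    rw [PySem.List.foldl_congr_mem _ _ (fun res _ => res) []
      (fun res k hk => step_skip_of_bad x k hx (PySem.List.mem_pyRange_one.mp hk).1 res)]
    exact List.foldl_fixed _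
  · push Not at hx
    obtain ⟨hxpos, hxne, hx3⟩ := hx
    have hxo : PySem.Int.mod x 2 = 1 := by
      rw [PySem.Int.mod_eq_emod_of_pos (by norm_num : (0:Int) < 2)] at hxne ⊢
      omega
    rw [if_neg (by push Not; exact ⟨hxpos, hxne, hx3⟩)]
    -- A's foldl becomes the filtered map over range(1, k_max+1)
    rw [PySem.List.foldl_congr_mem _ _
      (fun res k => if (Padm x k) = true
        then res ++ [(PySem.Int.floordiv (x * 2 ^ k.toNat) 3, k)] else res) []
      (fun res k hk => step_eq_of_odd_pos x k hxpos hxo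
        (PySem.List.mem_pyRange_one.mp hk).1 res)]
    rw [PySem.List.foldl_append_if]
    -- B's side: the starting k of the progression and its admissibility
    have hx3' : x % 3 = 1 ∨ x % 3 = 2 := by
      rw [PySem.Int.mod_eq_emod_of_pos (by norm_num : (0:Int) < 3)] at hx3
      omega
    have hxm : PySem.Int.mod x 3 = x % 3 := PySem.Int.mod_eq_emod_of_pos (by norm_num)
    rcases hx3' with h1 | h2
    · -- x ≡ 1 (mod 3): k0 = 2, and k = 1 is inadmissible, so range may start at 2
      have hg : PySem.Int.mod x 3 = 1 := by rw [hxm]; exact h1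
      simp only [hg, if_pos]
      have hP2 : Padm x 2 = true := by
        unfold Padm
        have : x * 2 ^ (2:Int).toNat = 4 * x := by
          rw [show (2:Int).toNat = 2 from rfl]; ring
        rw [this, PySem.Int.mod_eq_emod_of_pos (by norm_num)]
        simp only [beq_iff_eq]
        omega
      have hP1 : Padm x 1 = false := by
        unfold Padm
        have : x * 2 ^ (1:Int).toNat = 2 * x := by
          rw [show (1:Int).toNat = 1 from rfl]; ring
        rw [this, PySem.Int.mod_eq_emod_of_pos (by norm_num)]
        simp only [beq_eq_false_iff_ne, ne_eq]
        omega
      rw [altLoop_eq x k_max (k_max + 1 - 2).toNat 2 rfl (by norm_num) hP2 []]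
      have hrange : ((PySem.List.pyRange 1 (k_max + 1)).filter (fun j => Padm x j))
          = ((PySem.List.pyRange 2 (k_max + 1)).filter (fun j => Padm x j)) := by
        by_cases hkm : 1 ≤ k_max
        · rw [PySem.List.pyRange_one_cons (by omega)]
          simp [hP1]
        · rw [PySem.List.pyRange_one_eq_nil (by omega), PySem.List.pyRange_one_eq_nil (by omega)]
      rw [hrange]
    · -- x ≡ 2 (mod 3): k0 = 1 is admissible
      have hg : ¬ PySem.Int.mod x 3 = 1 := by rw [hxm]; omega
      rw [if_neg hg]
      have hP1 : Padm x 1 = true := by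
        unfold Padm
        have : x * 2 ^ (1:Int).toNat = 2 * x := by
          rw [show (1:Int).toNat = 1 from rfl]; ring
        rw [this, PySem.Int.mod_eq_emod_of_pos (by norm_num)]
        simp only [beq_iff_eq]
        omega
      rw [altLoop_eq x k_max (k_max + 1 - 1).toNat 1 rfl (by norm_num) hP1 []]
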